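-- pv_equiv track=rewrite | github.com/huzzle-app/coding-rl-envs | python/omnicloud/services/network/views.py | allocate_nat_port
-- ===== SOURCE A (Python) =====
-- from typing import Dict, Any, List, Optional
--
-- def allocate_nat_port(
--     allocated_ports: set,
--     min_port: int = 1024,
--     max_port: int = 65535,
-- ) -> Optional[int]:
--     """Allocate a NAT gateway port.
--
--     BUG D8: No atomic port allocation - two concurrent calls can
--     allocate the same port.
--     """
--
--     for port in range(min_port, max_port + 1):
--         if port not in allocated_ports:
--
--             # the check and the add
--             allocated_ports.add(port)
--             return port
--     return None
-- ===== SOURCE B (Python) =====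
-- def allocate_nat_port(
--     allocated_ports: set,
--     min_port: int = 1024,
--     max_port: int = 65535,
-- ):
--     # Walk the sorted in-range allocated ports looking for the first gap,
--     # instead of testing each candidate in the range for membership.
--     expected = min_port
--     for p in sorted(x for x in allocated_ports if min_port <= x <= max_port):
--         if p != expected:
--             break
--         expected = p + 1
--     if expected <= max_port:
--         allocated_ports.add(expected)
--         return expected
--     return None
-- ===== Notes on version B (the rewrite author's own statement) =====
-- stated objective: alternative
-- what changed: B sorts the in-range allocated ports once and scans that sorted list for the first gap starting at min_port, instead of A's upward scan over every candidate port with a membership test per candidate.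
import Mathlib
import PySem

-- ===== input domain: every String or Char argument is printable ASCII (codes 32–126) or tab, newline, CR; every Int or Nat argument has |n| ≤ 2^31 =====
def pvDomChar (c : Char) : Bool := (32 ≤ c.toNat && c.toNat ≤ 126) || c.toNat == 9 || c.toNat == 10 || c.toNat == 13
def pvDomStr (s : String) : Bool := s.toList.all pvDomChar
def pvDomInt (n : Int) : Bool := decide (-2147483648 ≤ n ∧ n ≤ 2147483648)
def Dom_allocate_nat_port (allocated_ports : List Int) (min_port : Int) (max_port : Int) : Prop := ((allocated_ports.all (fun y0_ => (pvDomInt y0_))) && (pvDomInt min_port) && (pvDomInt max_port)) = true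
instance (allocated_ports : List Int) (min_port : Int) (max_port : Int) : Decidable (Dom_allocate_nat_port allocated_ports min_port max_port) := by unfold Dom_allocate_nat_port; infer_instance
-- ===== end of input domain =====

-- B scans the sorted in-range allocated ports for the first gap instead of testing every
-- candidate in the range for membership (objective: alternative algorithm, similar cost).
-- Both A and B also add the returned port to the caller's set; the theorems below are about
-- the RETURN value only (both programs perform the same mutation).

-- ===== PORT A =====
-- the 'for port in range(min_port, max_port+1): if port not in allocated_ports: return port' loop
def pvALoop (allocated_ports : List Int) (max_port : Int) (port : Int) : Option Int :=
  if _h : port ≤ max_port then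
    if allocated_ports.contains port then
      pvALoop allocated_ports max_port (port + 1)
    else
      some port
  else
    none
  termination_by (max_port + 1 - port).toNat
  decreasing_by omega

def allocate_nat_port (allocated_ports : List Int) (min_port : Int) (max_port : Int) : Option Int :=
  pvALoop allocated_ports max_port min_port

-- ===== PORT B =====
-- the 'for p in sorted(...): if p != expected: break; expected = p + 1' loop
def pvBWalk (xs : List Int) (expected : Int) : Int :=
  match xs with
  | [] => expected
  | p :: rest => if p = expected then pvBWalk rest (expected + 1) else expected

def allocate_nat_port_alt (allocated_ports : List Int) (min_port : Int) (max_port : Int) : Option Int :=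
  let inRange := allocated_ports.filter (fun x => decide (min_port ≤ x) && decide (x ≤ max_port))
  let expected := pvBWalk (PySem.List.sorted inRange (fun x => x) false) min_port
  if expected ≤ max_port then some expected else none

-- ===== PRECONDITION & SPEC =====
-- Pre_ states only the representation invariant of the Python 'set' argument: the List Int
-- standing for allocated_ports holds distinct elements. It excludes no Python input.
def Pre_allocate_nat_port (allocated_ports : List Int) (min_port : Int) (max_port : Int) : Prop :=
  allocated_ports.Nodup
instance (allocated_ports : List Int) (min_port : Int) (max_port : Int) : Decidable (Pre_allocate_nat_port allocated_ports min_port max_port) := by unfold Pre_allocate_nat_port; infer_instance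

def pvWitness_allocate_nat_port : List Int × Int × Int := ([1024, 1025, 1027], 1024, 1030)

def Spec_allocate_nat_port (allocated_ports : List Int) (min_port : Int) (max_port : Int) (out : Option Int) : Prop := out = allocate_nat_port_alt allocated_ports min_port max_port
instance (allocated_ports : List Int) (min_port : Int) (max_port : Int) (out : Option Int) : Decidable (Spec_allocate_nat_port allocated_ports min_port max_port out) := by unfold Spec_allocate_nat_port; infer_instance

-- ===== CLAIM (what is proved, stated in full; the proofs are below) =====
def Claim_equal_allocate_nat_port : Prop := ∀ (allocated_ports : List Int) (min_port : Int) (max_port : Int), Dom_allocate_nat_port allocated_ports min_port max_port → Pre_allocate_nat_port allocated_ports min_port max_port → Spec_allocate_nat_port allocated_ports min_port max_port (allocate_nat_port allocated_ports min_port max_port)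

-- ===== LEMMAS AND PROOFS =====

-- A's loop, characterised by the first free port f: if every port in [port, f) is allocated
-- and f (when in range) is free, the loop answers f (or none when f is past max_port).
theorem pvALoop_eq (S : List Int) (max_port : Int) :
    ∀ (port f : Int), port ≤ f →
      (∀ q : Int, port ≤ q → q < f → S.contains q) →
      (f ≤ max_port → ¬ S.contains f = true) →
      pvALoop S max_port port = if f ≤ max_port then some f else none := by
  intro port f hpf
  induction h : (f - port).toNat generalizing port with
  | zero =>
    intro _hall hfree
    have : f = port := by omega
    subst this
    rw [pvALoop]
    split_ifs with h1 <;> simp_all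
  | succ n ih =>
    intro hall hfree
    have hlt : port < f := by omega
    by_cases hle : port ≤ max_port
    · rw [pvALoop]
      have hc : S.contains port := hall port le_rfl hlt
      simp only [hle, dif_pos, hc, if_pos]
      exact ih (port + 1) (by omega) (by omega) (fun q h1 h2 => hall q (by omega) h2) hfree
    · rw [pvALoop]
      have h2 : ¬ f ≤ max_port := by
        intro hfm
        exact hle (le_trans (le_of_lt hlt) hfm)
      simp [hle, h2]

theorem pvBWalk_ge : ∀ (xs : List Int) (e : Int), e ≤ pvBWalk xs e := by
  intro xs
  induction xs with
  | nil => intro e; simp [pvBWalk]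
  | cons p rest ih =>
    intro e
    simp only [pvBWalk]
    split_ifs with h
    · have := ih (e + 1); omega
    · exact le_rfl

-- B's walk over a strictly increasing list all of whose elements are ≥ e lands on the first
-- integer ≥ e missing from the list, and everything between e and it is in the list.
theorem pvBWalk_spec :
    ∀ (xs : List Int) (e : Int), xs.Pairwise (· < ·) → (∀ x ∈ xs, e ≤ x) →
      (pvBWalk xs e ∉ xs) ∧ (∀ q : Int, e ≤ q → q < pvBWalk xs e → q ∈ xs) := by
  intro xs
  induction xs with
  | nil => intro e _ _; simp [pvBWalk]
  | cons p rest ih =>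
    intro e hpw hge
    have hpw' : rest.Pairwise (· < ·) := hpw.of_cons
    have hhead : ∀ x ∈ rest, p < x := by
      intro x hx; exact List.rel_of_pairwise_cons hpw hx
    simp only [pvBWalk]
    split_ifs with h
    · subst h
      have hge' : ∀ x ∈ rest, p + 1 ≤ x := fun x hx => by have := hhead x hx; omega
      obtain ⟨h1, h2⟩ := ih (p + 1) hpw' hge'
      constructor
      · intro hmem
        rcases List.mem_cons.mp hmem with heq | hmem'
        · have := pvBWalk_ge rest (p + 1); omega
        · exact h1 hmem'
      · intro q hq1 hq2
        by_cases hqe : q = p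
        · simp [hqe]
        · exact List.mem_cons_of_mem _ (h2 q (by omega) hq2)
    · constructor
      · intro hmem
        rcases List.mem_cons.mp hmem with heq | hmem'
        · exact h heq.symm
        · have := hhead e hmem'
          have := hge p (List.mem_cons_self)
          omega
      · intro q hq1 hq2; omega

theorem mem_sorted_filter (allocated_ports : List Int) (min_port max_port x : Int) :
    x ∈ PySem.List.sorted (allocated_ports.filter (fun y => decide (min_port ≤ y) && decide (y ≤ max_port))) (fun y => y) false ↔
      x ∈ allocated_ports ∧ min_port ≤ x ∧ x ≤ max_port := by
  rw [PySem.List.mem_sorted, List.mem_filter]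
  simp

theorem sorted_filter_pairwise_lt (allocated_ports : List Int) (min_port max_port : Int)
    (hnd : allocated_ports.Nodup) :
    (PySem.List.sorted (allocated_ports.filter (fun y => decide (min_port ≤ y) && decide (y ≤ max_port))) (fun y => y) false).Pairwise (· < ·) := by
  have hle : (PySem.List.sorted (allocated_ports.filter (fun y => decide (min_port ≤ y) && decide (y ≤ max_port))) (fun y => y) false).Pairwise (fun a b => (fun y => y) a ≤ (fun y => y) b) :=
    PySem.List.sorted_pairwise _ _
  have hperm : (PySem.List.sorted (allocated_ports.filter (fun y => decide (min_port ≤ y) && decide (y ≤ max_port))) (fun y => y) false).Perm (allocated_ports.filter (fun y => decide (min_port ≤ y) && decide (y ≤ max_port))) :=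
    PySem.List.sorted_perm _ _ _
  have hnd' : (PySem.List.sorted (allocated_ports.filter (fun y => decide (min_port ≤ y) && decide (y ≤ max_port))) (fun y => y) false).Nodup :=
    (hperm.nodup_iff).mpr (hnd.filter _)
  have hne : (PySem.List.sorted (allocated_ports.filter (fun y => decide (min_port ≤ y) && decide (y ≤ max_port))) (fun y => y) false).Pairwise (· ≠ ·) :=
    hnd'
  exact (hle.and hne).imp (fun h => lt_of_le_of_ne h.1 h.2)

-- ===== VERDICT (by name: the statement is the Claim_ definition above) =====
theorem allocate_nat_port_spec : Claim_equal_allocate_nat_port := by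
  intro aps minp maxp _hdom hnd
  unfold Spec_allocate_nat_port allocate_nat_port allocate_nat_port_alt
  set ys := PySem.List.sorted (aps.filter (fun y => decide (minp ≤ y) && decide (y ≤ maxp))) (fun y => y) false with hys
  have hpw := sorted_filter_pairwise_lt aps minp maxp hnd
  have hgemem : ∀ x ∈ ys, minp ≤ x := by
    intro x hx
    exact ((mem_sorted_filter aps minp maxp x).mp hx).2.1
  obtain ⟨hfree, hall⟩ := pvBWalk_spec ys minp hpw hgemem
  have hge := pvBWalk_ge ys minp
  refine pvALoop_eq aps maxp minp (pvBWalk ys minp) hge ?_ ?_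
  · intro q h1 h2
    have hq : q ∈ aps := ((mem_sorted_filter aps minp maxp q).mp (hall q h1 h2)).1
    exact List.elem_eq_true_of_mem hq
  · intro hle hc
    exact hfree ((mem_sorted_filter aps minp maxp _).mpr ⟨List.mem_of_elem_eq_true hc, hge, hle⟩)
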